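-- pv_equiv track=rewrite | github.com/bgoonz/Data-Structures-Algos-Codebase | Google-FooBar-master/E/NK_MANSON.py | nk
-- ===== SOURCE A (Python) =====
-- box = {
--     ((0, 0), (0, 0)) : 0,
--     ((0, 0), (0, 1)) : 1,
--     ((0, 0), (1, 0)) : 1,
--     ((0, 0), (1, 1)) : 0,
--     ((0, 1), (0, 0)) : 1,
--     ((0, 1), (0, 1)) : 0,
--     ((0, 1), (1, 0)) : 0,
--     ((0, 1), (1, 1)) : 0,
--     ((1, 0), (0, 0)) : 1,
--     ((1, 0), (0, 1)) : 0,
--     ((1, 0), (1, 0)) : 0,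
--     ((1, 0), (1, 1)) : 0,
--     ((1, 1), (0, 0)) : 0,
--     ((1, 1), (0, 1)) : 0,
--     ((1, 1), (1, 0)) : 0,
--     ((1, 1), (1, 1)) : 0,
-- }
--
-- def swap_row_col(g):
--     return tuple(zip(*g))
--
-- def nk(firstColumn):
--     def first_col_int(f_c_col):
--         def initialize(col):
--             g0 = col[0]
--             l = []
--             for key,val in box.items():
--                 if g0 == val:
--                     l.append(key)
--             return tuple(l)
--
--         x = ((0,0),(0,1),(1,0),(1,1))
--         present = initialize(f_c_col)
--         for n in range(1,len(f_c_col)):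
--             new = []
--             for z in present:
--                 for comb in x:
--                     possibility = (z[n],comb)
--
--                     if box[possibility] == f_c_col[n]:
--                         temp = list(z)
--                         temp.append(comb)
--                         new.append(temp)
--
--             present = tuple(new)
--         return tuple([swap_row_col(x) for x in present])
--
--     if firstColumn in no_col:
--         return no_col[firstColumn]
--     else:
--         right_grids = first_col_int(firstColumn)
--         no_col[firstColumn] = right_grids
--         return right_grids
--
-- no_col = {}
-- ===== SOURCE B (Python) =====
-- box = {
--     ((0, 0), (0, 0)) : 0,
--     ((0, 0), (0, 1)) : 1,
--     ((0, 0), (1, 0)) : 1,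
--     ((0, 0), (1, 1)) : 0,
--     ((0, 1), (0, 0)) : 1,
--     ((0, 1), (0, 1)) : 0,
--     ((0, 1), (1, 0)) : 0,
--     ((0, 1), (1, 1)) : 0,
--     ((1, 0), (0, 0)) : 1,
--     ((1, 0), (0, 1)) : 0,
--     ((1, 0), (1, 0)) : 0,
--     ((1, 0), (1, 1)) : 0,
--     ((1, 1), (0, 0)) : 0,
--     ((1, 1), (0, 1)) : 0,
--     ((1, 1), (1, 0)) : 0,
--     ((1, 1), (1, 1)) : 0,
-- }
--
-- X = ((0, 0), (0, 1), (1, 0), (1, 1))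
--
-- def nk(firstColumn):
--     # recursive DFS backtracking instead of BFS layer-by-layer tuples
--     results = []
--
--     def extend(rows, n):
--         if n == len(firstColumn):
--             results.append(tuple(zip(*rows)))
--             return
--         last = rows[-1]
--         for comb in X:
--             if box[(last, comb)] == firstColumn[n]:
--                 extend(rows + [comb], n + 1)
--
--     for (r0, r1), val in box.items():
--         if val == firstColumn[0]:
--             extend([r0, r1], 1)
--     return tuple(results)
-- ===== Notes on version B (the rewrite author's own statement) =====
-- stated objective: alternative
-- what changed: Replaces A's layer-by-layer BFS that rebuilds whole tuples of partial grids (plus a global memo dict) with a recursive DFS backtracking helper that extends one partial grid at a time and emits transposed grids in the same lexicographic order.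
import Mathlib
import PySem

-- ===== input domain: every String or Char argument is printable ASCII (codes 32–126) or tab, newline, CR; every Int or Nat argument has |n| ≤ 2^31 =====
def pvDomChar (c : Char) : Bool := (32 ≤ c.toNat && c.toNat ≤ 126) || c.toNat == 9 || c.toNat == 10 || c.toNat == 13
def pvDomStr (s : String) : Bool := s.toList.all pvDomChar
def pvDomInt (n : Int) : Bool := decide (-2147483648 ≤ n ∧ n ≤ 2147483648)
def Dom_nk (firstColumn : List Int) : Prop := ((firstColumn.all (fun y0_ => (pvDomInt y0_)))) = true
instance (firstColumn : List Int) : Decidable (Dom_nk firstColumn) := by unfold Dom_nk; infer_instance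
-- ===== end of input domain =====

-- B replaces A's layer-by-layer (BFS) tuple rebuilding with recursive DFS backtracking; equivalence of the RETURN value (A also caches results in a global dict, which is not output-observable).

-- the module-level 'box' dict, in insertion order
def pvBox : List (((Int × Int) × (Int × Int)) × Int) :=
  [ (((0,0),(0,0)),0), (((0,0),(0,1)),1), (((0,0),(1,0)),1), (((0,0),(1,1)),0),
    (((0,1),(0,0)),1), (((0,1),(0,1)),0), (((0,1),(1,0)),0), (((0,1),(1,1)),0),
    (((1,0),(0,0)),1), (((1,0),(0,1)),0), (((1,0),(1,0)),0), (((1,0),(1,1)),0),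
    (((1,1),(0,0)),0), (((1,1),(0,1)),0), (((1,1),(1,0)),0), (((1,1),(1,1)),0) ]

-- box[k]; every lookup performed by either program hits a key, so the default is never returned
def pvBoxGet (k : (Int × Int) × (Int × Int)) : Int := (pvBox.lookup k).getD 0

-- ===== PORT A =====
-- partial grids are lists of rows (a row = pair of bits); z[n] is always in range for A
def nk (firstColumn : List Int) : List (List (List Int)) :=
  let x : List (Int × Int) := [(0,0),(0,1),(1,0),(1,1)]
  -- initialize: keys of box whose value equals firstColumn[0] (pyGetD default unreachable under Pre_)
  let g0 : Int := PySem.List.pyGetD firstColumn 0 0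
  let present0 : List (List (Int × Int)) :=
    pvBox.foldl (fun l kv => if g0 == kv.2 then l ++ [[kv.1.1, kv.1.2]] else l) []
  let present :=
    (PySem.List.pyRange 1 (firstColumn.length : Int) 1).foldl
      (fun present n =>
        present.foldl (fun new z =>
          x.foldl (fun new comb =>
            if pvBoxGet (PySem.List.pyGetD z n ((0:Int),(0:Int)), comb) ==
                 PySem.List.pyGetD firstColumn n 0
            then new ++ [z ++ [comb]] else new) new) []) present0
  -- swap_row_col: zip over rows of width 2
  present.map (fun g => [g.map Prod.fst, g.map Prod.snd])

-- ===== PORT B =====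
-- DFS: extend the partial grid row by row; emits the transposed grid when n reaches the end
def nkDfs (firstColumn : List Int) (rows : List (Int × Int)) (n : Nat) :
    List (List (List Int)) :=
  if h : n < firstColumn.length then
    ([(0,0),(0,1),(1,0),(1,1)] : List (Int × Int)).foldl
      (fun res comb =>
        if pvBoxGet ((rows.getLast?).getD ((0:Int),(0:Int)), comb) ==
             PySem.List.pyGetD firstColumn (n : Int) 0
        then res ++ nkDfs firstColumn (rows ++ [comb]) (n + 1) else res) []
  else [[rows.map Prod.fst, rows.map Prod.snd]]
termination_by firstColumn.length - n

def nk_alt (firstColumn : List Int) : List (List (List Int)) :=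
  pvBox.foldl (fun res kv =>
    if kv.2 == PySem.List.pyGetD firstColumn 0 0
    then res ++ nkDfs firstColumn [kv.1.1, kv.1.2] 1 else res) []

-- ===== PRECONDITION & SPEC =====
-- Pre_ excludes only the empty list, on which Python A raises IndexError (firstColumn[0]).
def Pre_nk (firstColumn : List Int) : Prop := firstColumn ≠ []
instance (firstColumn : List Int) : Decidable (Pre_nk firstColumn) := by unfold Pre_nk; infer_instance
def pvWitness_nk : List Int := [0, 1]

def Spec_nk (firstColumn : List Int) (out : List (List (List Int))) : Prop := out = nk_alt firstColumn
instance (firstColumn : List Int) (out : List (List (List Int))) : Decidable (Spec_nk firstColumn out) := by unfold Spec_nk; infer_instance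

-- ===== CLAIM (what is proved, stated in full; the proofs are below) =====
def Claim_equal_nk : Prop := ∀ (firstColumn : List Int), Dom_nk firstColumn → Pre_nk firstColumn → Spec_nk firstColumn (nk firstColumn)

-- ===== LEMMAS AND PROOFS =====

theorem pv_foldl_append_if_flatMap {α β : Type} (p : α → Bool) (f : α → List β)
    (l : List α) (acc : List β) :
    l.foldl (fun acc x => if p x then acc ++ f x else acc) acc
      = acc ++ (l.filter p).flatMap f := by
  induction l generalizing acc with
  | nil => simp
  | cons a t ih =>
      by_cases h : p a <;> simp [List.filter, h, ih, List.append_assoc]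

theorem pv_pyGetD_last {α : Type} (z : List α) (n : Nat) (d : α)
    (h : z.length = n + 1) :
    PySem.List.pyGetD z (n : Int) d = (z.getLast?).getD d := by
  simp [PySem.List.pyGetD, PySem.List.pyGet?, PySem.List.pyIdx?, h, List.getLast?_eq_getElem?]

theorem pv_flatMap_singleton {α β : Type} (f : α → β) (l : List α) :
    l.flatMap (fun z => [f z]) = l.map f := by
  induction l <;> simp_all

theorem pv_flatMap_congr_mem {α β : Type} {l : List α} {f g : α → List β}
    (h : ∀ x ∈ l, f x = g x) : l.flatMap f = l.flatMap g := by
  induction l with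
  | nil => rfl
  | cons a t ih =>
      simp only [List.flatMap_cons]
      rw [h a (by simp), ih (fun x hx => h x (by simp [hx]))]

-- main invariant: the remaining BFS layers, transposed, equal the DFS continuation
theorem pv_bfs_eq_dfs (fc : List Int) :
    ∀ (k n : Nat) (present : List (List (Int × Int))),
      fc.length - n ≤ k →
      (∀ z ∈ present, z.length = n + 1) →
      ((PySem.List.pyRange (n : Int) (fc.length : Int) 1).foldl
          (fun present m =>
            present.foldl (fun new z =>
              ([(0,0),(0,1),(1,0),(1,1)] : List (Int × Int)).foldl (fun new comb =>
                if pvBoxGet (PySem.List.pyGetD z m ((0:Int),(0:Int)), comb) ==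
                     PySem.List.pyGetD fc m 0
                then new ++ [z ++ [comb]] else new) new) []) present).map
        (fun g => [g.map Prod.fst, g.map Prod.snd])
        = present.flatMap (fun z => nkDfs fc z n) := by
  intro k
  induction k with
  | zero =>
      intro n present hk _
      have hn : fc.length ≤ n := by omega
      rw [PySem.List.pyRange_one_eq_nil (by exact_mod_cast hn)]
      simp only [List.foldl_nil]
      rw [pv_flatMap_congr_mem (g := fun z => [[z.map Prod.fst, z.map Prod.snd]])
        (fun z _ => by rw [nkDfs]; simp [Nat.not_lt.mpr hn])]
      rw [pv_flatMap_singleton]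
  | succ k ih =>
      intro n present hk hlen
      by_cases hn : n < fc.length
      · rw [PySem.List.pyRange_one_cons (by exact_mod_cast hn)]
        rw [List.foldl_cons (a := ((n : Nat) : Int))]
        have hstep :
            present.foldl (fun new z =>
              ([(0,0),(0,1),(1,0),(1,1)] : List (Int × Int)).foldl (fun new comb =>
                if pvBoxGet (PySem.List.pyGetD z (n : Int) ((0:Int),(0:Int)), comb) ==
                     PySem.List.pyGetD fc (n : Int) 0
                then new ++ [z ++ [comb]] else new) new) []
            = present.flatMap (fun z =>
                (([(0,0),(0,1),(1,0),(1,1)] : List (Int × Int)).filter (fun comb =>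
                  pvBoxGet (PySem.List.pyGetD z (n : Int) ((0:Int),(0:Int)), comb) ==
                    PySem.List.pyGetD fc (n : Int) 0)).flatMap
                  (fun comb => [z ++ [comb]])) := by
          rw [show (fun (new : List (List (Int × Int))) (z : List (Int × Int)) =>
              ([(0,0),(0,1),(1,0),(1,1)] : List (Int × Int)).foldl (fun new comb =>
                if pvBoxGet (PySem.List.pyGetD z (n : Int) ((0:Int),(0:Int)), comb) ==
                     PySem.List.pyGetD fc (n : Int) 0
                then new ++ [z ++ [comb]] else new) new)
            = (fun new z => new ++
                (([(0,0),(0,1),(1,0),(1,1)] : List (Int × Int)).filter (fun comb =>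
                  pvBoxGet (PySem.List.pyGetD z (n : Int) ((0:Int),(0:Int)), comb) ==
                    PySem.List.pyGetD fc (n : Int) 0)).flatMap
                  (fun comb => [z ++ [comb]])) from by
              funext new z
              exact pv_foldl_append_if_flatMap _ _ _ _]
          rw [PySem.List.foldl_append_eq_flatMap]
          simp
        rw [hstep]
        have hcast : ((n : Int) + 1) = ((n + 1 : Nat) : Int) := by push_cast; ring
        rw [hcast, ih (n + 1) _ (by omega) ?inv]
        case inv =>
          intro z' hz'
          simp only [List.mem_flatMap, List.mem_singleton] at hz'
          obtain ⟨z, hz, comb, hcomb, hz'eq⟩ := hz'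
          subst hz'eq
          simp [hlen z hz]
        rw [List.flatMap_assoc]
        refine pv_flatMap_congr_mem (fun z hz => ?_)
        rw [nkDfs]
        simp only [hn, dif_pos]
        rw [pv_foldl_append_if_flatMap, List.nil_append]
        have hz1 : z.length = n + 1 := hlen z hz
        rw [pv_pyGetD_last z n ((0:Int),(0:Int)) hz1, List.flatMap_assoc]
        refine pv_flatMap_congr_mem (fun comb _ => ?_)
        simp
      · have hn' : fc.length ≤ n := by omega
        rw [PySem.List.pyRange_one_eq_nil (by exact_mod_cast hn')]
        simp only [List.foldl_nil]
        rw [pv_flatMap_congr_mem (g := fun z => [[z.map Prod.fst, z.map Prod.snd]])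
          (fun z _ => by rw [nkDfs]; simp [Nat.not_lt.mpr hn'])]
        rw [pv_flatMap_singleton]

-- ===== VERDICT (by name: the statement is the Claim_ definition above) =====
theorem nk_spec : Claim_equal_nk := by
  intro fc _ _
  unfold Spec_nk nk nk_alt
  simp only []
  have hinv : ∀ z ∈ (pvBox.foldl (fun l kv =>
      if PySem.List.pyGetD fc 0 0 == kv.2 then l ++ [[kv.1.1, kv.1.2]] else l)
      ([] : List (List (Int × Int)))), z.length = 1 + 1 := by
    intro z hz
    rw [pv_foldl_append_if_flatMap
      (p := fun kv : (((Int × Int) × (Int × Int)) × Int) => PySem.List.pyGetD fc 0 0 == kv.2)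
      (f := fun kv : (((Int × Int) × (Int × Int)) × Int) => [[kv.1.1, kv.1.2]])] at hz
    simp only [List.nil_append, List.mem_flatMap, List.mem_singleton] at hz
    obtain ⟨kv, _, hkv⟩ := hz
    subst hkv
    simp
  have h := pv_bfs_eq_dfs fc fc.length 1 _ (by omega) hinv
  push_cast at h
  rw [h]
  rw [pv_foldl_append_if_flatMap
        (p := fun kv : (((Int × Int) × (Int × Int)) × Int) => PySem.List.pyGetD fc 0 0 == kv.2)
        (f := fun kv : (((Int × Int) × (Int × Int)) × Int) => [[kv.1.1, kv.1.2]]),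
      pv_foldl_append_if_flatMap
        (p := fun kv : (((Int × Int) × (Int × Int)) × Int) => kv.2 == PySem.List.pyGetD fc 0 0)
        (f := fun kv : (((Int × Int) × (Int × Int)) × Int) => nkDfs fc [kv.1.1, kv.1.2] 1)]
  simp only [List.nil_append, List.flatMap_assoc]
  have hfilter :
      (pvBox.filter (fun kv => PySem.List.pyGetD fc 0 0 == kv.2))
        = (pvBox.filter (fun kv => kv.2 == PySem.List.pyGetD fc 0 0)) := by
    refine List.filter_congr (fun kv _ => ?_)
    simp [eq_comm]
  rw [hfilter]
  refine pv_flatMap_congr_mem (fun kv _ => ?_)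
  simp
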